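-- pv_equiv track=rewrite | github.com/AllaAndreevna/Yandex-Algo-Training-6.0 | HW2/HW2_task10.py | solve
-- ===== SOURCE A (Python) =====
-- def solve(n, a, m, k, x):
--     answers = [0] * n
--     answers[0] = 1
--     current_k = 0
--     last_elem_ind = 0
--     for i in range(1, n):
--         if a[i] > a[i - 1]:
--             answers[i] = answers[i - 1]
--         elif a[i] < a[i - 1]:
--             answers[i] = i + 1
--             current_k = 0
--             last_elem_ind = i
--         else:
--             current_k += 1
--             if current_k <= k:
--                 answers[i] = answers[i - 1]
--             else:
--                 while current_k > k:
--                     last_elem_ind += 1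
--                     if a[last_elem_ind] == a[last_elem_ind - 1]:
--                         current_k -= 1
--                 answers[i] = last_elem_ind + 1
--
--     results = [0] * m
--     for i in range(m):
--         results[i] = answers[x[i] - 1]
--     return results
-- ===== SOURCE B (Python) =====
-- def solve(n, a, m, k, x):
--     # Indexed equal-pair positions instead of A's rescanning two-pointer:
--     # eqpos records every i with a[i] == a[i-1]; dec/base mark the last strict
--     # decrease and how many equal pairs lie at or before it, so the window
--     # start on overflow is read off eqpos by index arithmetic (no inner scan).
--     answers = [1]
--     eqpos = []
--     dec = 0
--     base = 0
--     for i in range(1, n):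
--         if a[i] < a[i - 1]:
--             dec = i
--             base = len(eqpos)
--             answers.append(i + 1)
--         elif a[i] == a[i - 1]:
--             eqpos.append(i)
--             if len(eqpos) - base > k:
--                 answers.append(eqpos[len(eqpos) - k - 1] + 1)
--             else:
--                 answers.append(answers[-1])
--         else:
--             answers.append(answers[-1])
--     return [answers[x[i] - 1] for i in range(m)]
-- ===== Notes on version B (the rewrite author's own statement) =====
-- stated objective: alternative
-- what changed: A tracks the window with scalar current_k/last_elem_ind and, on overflow, rescans the array forward looking for the next equal pair; B instead keeps an append-only list eqpos of all equal-pair positions plus dec/base markers for the last decrease, and reads the new window start off eqpos by index arithmetic (eqpos[len-k-1]) with no inner scan.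
-- outside the precondition, e.g. on solve(2, [1, 1, 1], 1, -1, [2]): A returns [3], B raises IndexError
import Mathlib
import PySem

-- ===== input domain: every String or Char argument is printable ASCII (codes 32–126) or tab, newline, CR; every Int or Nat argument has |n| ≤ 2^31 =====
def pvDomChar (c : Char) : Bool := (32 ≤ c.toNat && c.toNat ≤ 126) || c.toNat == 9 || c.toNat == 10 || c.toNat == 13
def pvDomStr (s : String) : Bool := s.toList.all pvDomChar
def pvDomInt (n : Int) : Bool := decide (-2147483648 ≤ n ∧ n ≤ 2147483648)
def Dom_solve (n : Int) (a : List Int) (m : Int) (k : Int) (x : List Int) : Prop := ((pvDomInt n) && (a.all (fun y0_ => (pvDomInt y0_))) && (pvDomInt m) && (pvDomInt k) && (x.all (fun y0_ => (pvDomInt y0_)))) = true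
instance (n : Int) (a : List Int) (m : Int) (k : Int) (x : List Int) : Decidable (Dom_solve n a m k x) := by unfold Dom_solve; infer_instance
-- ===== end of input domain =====

-- B replaces A's inner rescanning while-loop by an append-only index of equal-pair positions
-- consulted by index arithmetic (alternative decomposition; no speed claim).

-- ===== PORT A =====
-- the inner 'while current_k > k' scan; the fuel (a.length + 1 at the call site) only bounds the
-- recursion — inside Pre_solve the scan stops within the list and the fuel is never exhausted
def solveAWhile (a : List Int) (k : Int) (ck lei : Int) : Nat → Int × Int
  | 0 => (ck, lei)
  | fuel+1 =>
    if k < ck then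
      solveAWhile a k
        (if PySem.List.pyGetD a (lei+1) 0 = PySem.List.pyGetD a (lei+1-1) 0 then ck - 1 else ck)
        (lei+1) fuel
    else (ck, lei)

-- 'for i in range(1, n)'; the list assignment answers[i] = v is List.set i.toNat v (the loop index
-- i is ≥ 1 and in range, where Python's assignment is exact); a[j] is pyGetD (the default is never
-- read inside Pre_solve, where every access is in range)
def solveALoop (a : List Int) (k n : Int) (i : Int) (ans : List Int) (ck lei : Int) : List Int :=
  if _h : i < n then
    if PySem.List.pyGetD a (i-1) 0 < PySem.List.pyGetD a i 0 then
      solveALoop a k n (i+1) (ans.set i.toNat (PySem.List.pyGetD ans (i-1) 0)) ck lei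
    else if PySem.List.pyGetD a i 0 < PySem.List.pyGetD a (i-1) 0 then
      solveALoop a k n (i+1) (ans.set i.toNat (i+1)) 0 i
    else
      if ck + 1 ≤ k then
        solveALoop a k n (i+1) (ans.set i.toNat (PySem.List.pyGetD ans (i-1) 0)) (ck+1) lei
      else
        solveALoop a k n (i+1)
          (ans.set i.toNat ((solveAWhile a k (ck+1) lei (a.length+1)).2 + 1))
          (solveAWhile a k (ck+1) lei (a.length+1)).1
          (solveAWhile a k (ck+1) lei (a.length+1)).2
  else ans
termination_by (n - i).toNat
decreasing_by all_goals omega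

-- 'for i in range(m): results[i] = answers[x[i] - 1]'
def solveARes (ans x : List Int) (m : Int) (i : Int) (res : List Int) : List Int :=
  if _h : i < m then
    solveARes ans x m (i+1) (res.set i.toNat (PySem.List.pyGetD ans (PySem.List.pyGetD x i 0 - 1) 0))
  else res
termination_by (m - i).toNat
decreasing_by all_goals omega

-- answers = [0]*n; answers[0] = 1 (IndexError when n < 1 — excluded by Pre_solve)
def solve (n : Int) (a : List Int) (m : Int) (k : Int) (x : List Int) : List Int :=
  solveARes (solveALoop a k n 1 ((List.replicate n.toNat (0:Int)).set 0 1) 0 0)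
    x m 0 (List.replicate m.toNat 0)

-- ===== PORT B =====
def solveBLoop (a : List Int) (k n : Int) (i : Int) (ans eqpos : List Int) (dec base : Int) : List Int :=
  if _h : i < n then
    if PySem.List.pyGetD a i 0 < PySem.List.pyGetD a (i-1) 0 then
      solveBLoop a k n (i+1) (ans ++ [i+1]) eqpos i (eqpos.length : Int)
    else if PySem.List.pyGetD a i 0 = PySem.List.pyGetD a (i-1) 0 then
      if k < ((eqpos ++ [i]).length : Int) - base then
        solveBLoop a k n (i+1)
          (ans ++ [PySem.List.pyGetD (eqpos ++ [i]) (((eqpos ++ [i]).length : Int) - k - 1) 0 + 1])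
          (eqpos ++ [i]) dec base
      else
        solveBLoop a k n (i+1) (ans ++ [PySem.List.pyGetD ans (-1) 0]) (eqpos ++ [i]) dec base
    else
      solveBLoop a k n (i+1) (ans ++ [PySem.List.pyGetD ans (-1) 0]) eqpos dec base
  else ans
termination_by (n - i).toNat
decreasing_by all_goals omega

def solve_alt (n : Int) (a : List Int) (m : Int) (k : Int) (x : List Int) : List Int :=
  (PySem.List.pyRange 0 m 1).map
    (fun i => PySem.List.pyGetD (solveBLoop a k n 1 [1] [] 0 0) (PySem.List.pyGetD x i 0 - 1) 0)

-- ===== PRECONDITION & SPEC =====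
-- Pre_solve keeps the inputs where Python A returns: n ≥ 1 and (for n > 1) n ≤ len(a) (else
-- IndexError), m ≤ len(x) with every queried index inside answers' range (else IndexError); the
-- one carve-out of inputs A can return on is k < 0 with an adjacent equal pair in a[1:n]: there
-- A's inner scan runs past the window (usually an IndexError, otherwise an answer computed from
-- elements beyond index n-1, an artefact of the scan), while B raises IndexError.
def Pre_solve (n : Int) (a : List Int) (m : Int) (k : Int) (x : List Int) : Prop :=
  1 ≤ n ∧ (1 < n → n ≤ (a.length : Int)) ∧ m ≤ (x.length : Int) ∧
  (∀ q ∈ x.take m.toNat, 1 - n ≤ q ∧ q ≤ n) ∧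
  (0 ≤ k ∨ ∀ j ∈ PySem.List.pyRange 1 n 1, PySem.List.pyGetD a j 0 ≠ PySem.List.pyGetD a (j-1) 0)
instance (n : Int) (a : List Int) (m : Int) (k : Int) (x : List Int) : Decidable (Pre_solve n a m k x) := by unfold Pre_solve; infer_instance

def pvWitness_solve : Int × List Int × Int × Int × List Int := (3, [1, 1, 2], 2, 1, [3, 1])

def Spec_solve (n : Int) (a : List Int) (m : Int) (k : Int) (x : List Int) (out : List Int) : Prop := out = solve_alt n a m k x
instance (n : Int) (a : List Int) (m : Int) (k : Int) (x : List Int) (out : List Int) : Decidable (Spec_solve n a m k x out) := by unfold Spec_solve; infer_instance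

-- ===== CLAIM (what is proved, stated in full; the proofs are below) =====
def Claim_equal_solve : Prop := ∀ (n : Int) (a : List Int) (m : Int) (k : Int) (x : List Int), Dom_solve n a m k x → Pre_solve n a m k x → Spec_solve n a m k x (solve n a m k x)

-- ===== LEMMAS AND PROOFS =====

-- the list of positions j ∈ [1, b) with a[j] == a[j-1] (B's eqpos after processing prefix [0, b))
def eqList (a : List Int) (b : Int) : List Int :=
  (PySem.List.pyRange 1 b 1).filter (fun j => decide (PySem.List.pyGetD a j 0 = PySem.List.pyGetD a (j-1) 0))

theorem eqList_one (a : List Int) : eqList a 1 = [] := by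
  simp [eqList, PySem.List.pyRange_one_eq_nil]

theorem eqList_succ (a : List Int) (i : Int) (h : 1 ≤ i) :
    eqList a (i+1) = eqList a i ++
      (if PySem.List.pyGetD a i 0 = PySem.List.pyGetD a (i-1) 0 then [i] else []) := by
  unfold eqList
  rw [PySem.List.pyRange_one_succ_right h, List.filter_append]
  by_cases hEq : PySem.List.pyGetD a i 0 = PySem.List.pyGetD a (i-1) 0 <;>
    simp [List.filter, hEq]

theorem mem_eqList (a : List Int) (b j : Int) :
    j ∈ eqList a b ↔ 1 ≤ j ∧ j < b ∧ PySem.List.pyGetD a j 0 = PySem.List.pyGetD a (j-1) 0 := by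
  simp [eqList, List.mem_filter, PySem.List.mem_pyRange_one, and_assoc]

theorem eqList_sorted (a : List Int) (b : Int) : (eqList a b).Pairwise (· < ·) :=
  (PySem.List.pairwise_lt_pyRange_one 1 b).filter _

theorem eqList_split (a : List Int) (d b : Int) (h1 : 1 ≤ d) (h2 : d ≤ b) :
    eqList a b = eqList a d ++
      (PySem.List.pyRange d b 1).filter
        (fun j => decide (PySem.List.pyGetD a j 0 = PySem.List.pyGetD a (j-1) 0)) := by
  unfold eqList
  rw [PySem.List.pyRange_one_append 1 d b h1 h2, List.filter_append]

theorem eqList_mono_len (a : List Int) (d b : Int) (h1 : 1 ≤ d) (h2 : d ≤ b) :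
    (eqList a d).length ≤ (eqList a b).length := by
  rw [eqList_split a d b h1 h2]; simp

-- element of the part of eqList a b below the eqList a (dec+1) prefix is ≤ dec
theorem eqList_getElem_le_dec (a : List Int) (dec b : Int) (hd : 0 ≤ dec) (hb : dec + 1 ≤ b)
    (s : Nat) (hsW : s < (eqList a b).length) (hs : s < (eqList a (dec+1)).length) :
    (eqList a b)[s]! ≤ dec := by
  rw [getElem!_pos _ s hsW]
  have hsplit := eqList_split a (dec+1) b (by omega) hb
  have : (eqList a b)[s] = (eqList a (dec+1))[s] := by
    rw [List.getElem_of_eq hsplit, List.getElem_append_left hs]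
  rw [this]
  have hmem : (eqList a (dec+1))[s] ∈ eqList a (dec+1) := List.getElem_mem _
  have := (mem_eqList a (dec+1) _).mp hmem
  omega

-- element of eqList a b at or past that prefix is > dec
theorem eqList_getElem_gt_dec (a : List Int) (dec b : Int) (hd : 0 ≤ dec) (hb : dec + 1 ≤ b)
    (s : Nat) (hsW : s < (eqList a b).length) (hs : (eqList a (dec+1)).length ≤ s) :
    dec < (eqList a b)[s]! := by
  rw [getElem!_pos _ s hsW]
  have hsplit := eqList_split a (dec+1) b (by omega) hb
  have hlen : s - (eqList a (dec+1)).length <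
      ((PySem.List.pyRange (dec+1) b 1).filter
        (fun j => decide (PySem.List.pyGetD a j 0 = PySem.List.pyGetD a (j-1) 0))).length := by
    have := hsW; rw [hsplit, List.length_append] at this; omega
  have : (eqList a b)[s] =
      ((PySem.List.pyRange (dec+1) b 1).filter
        (fun j => decide (PySem.List.pyGetD a j 0 = PySem.List.pyGetD a (j-1) 0)))[s - (eqList a (dec+1)).length] := by
    rw [List.getElem_of_eq hsplit, List.getElem_append_right hs]
  rw [this]
  have hmem := List.getElem_mem hlen
  have := List.mem_filter.mp hmem
  have := PySem.List.mem_pyRange_one.mp this.1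
  omega

theorem solveAWhile_done (a : List Int) (k lei : Int) (f : Nat) :
    solveAWhile a k k lei f = (k, lei) := by
  cases f <;> simp [solveAWhile]

theorem solveAWhile_spec (a : List Int) (k : Int) :
    ∀ (fuel : Nat) (lei j0 : Int), lei < j0 →
    PySem.List.pyGetD a j0 0 = PySem.List.pyGetD a (j0-1) 0 →
    (∀ j, lei < j → j < j0 → PySem.List.pyGetD a j 0 ≠ PySem.List.pyGetD a (j-1) 0) →
    (j0 - lei).toNat ≤ fuel →
    solveAWhile a k (k+1) lei fuel = (k, j0) := by
  intro fuel
  induction fuel with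
  | zero => intro lei j0 h1 _ _ hf; omega
  | succ f ih =>
    intro lei j0 h1 h2 h3 hf
    rw [solveAWhile]
    rw [if_pos (by omega : k < k + 1)]
    by_cases hj : lei + 1 = j0
    · rw [if_pos (by rw [hj]; simpa using h2)]
      have : k + 1 - 1 = k := by omega
      rw [this, hj]
      exact solveAWhile_done a k j0 f
    · have hne := h3 (lei + 1) (by omega) (by omega)
      rw [if_neg (by simpa using hne)]
      exact ih (lei + 1) j0 (by omega) h2 (fun j hj1 hj2 => h3 j (by omega) hj2) (by omega)

-- setting position i (= pref.length) in pref ++ [0,0,…] appends the value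
theorem set_append_replicate (pref : List Int) (r : Nat) (v : Int) (i : Int)
    (hlen : pref.length = i.toNat) (hr : 1 ≤ r) :
    (pref ++ List.replicate r (0:Int)).set i.toNat v
      = (pref ++ [v]) ++ List.replicate (r-1) 0 := by
  obtain ⟨r', rfl⟩ : ∃ r', r = r' + 1 := ⟨r - 1, by omega⟩
  rw [← hlen, List.replicate_succ, List.set_append_right _ _ (le_refl _)]
  simp

-- reading answers[i-1] in A's padded array = reading answers[-1] in B's grown list
theorem read_last (pref rest : List Int) (i : Int) (h1 : 1 ≤ i) (hlen : pref.length = i.toNat) :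
    PySem.List.pyGetD (pref ++ rest) (i - 1) 0 = PySem.List.pyGetD pref (-1) 0 := by
  have hne : pref ≠ [] := by
    intro h; rw [h] at hlen; simp at hlen; omega
  rw [PySem.List.pyGetD_neg_one pref 0 hne]
  rw [PySem.List.pyGetD_eq_getElem (pref ++ rest) 0 (by omega) (by simp; omega)]
  rw [List.getElem_append_left (by omega)]
  rw [List.getLast_eq_getElem]
  congr 1
  omega

-- in a strictly sorted list, if everything strictly below index t is ≤ p then W[t] is the
-- least member above p
theorem sorted_next (W : List Int) (hs : W.Pairwise (· < ·)) (t : Nat) (ht : t < W.length)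
    (p : Int) (hmax : ∀ s : Nat, s < W.length → s < t → W[s]! ≤ p) :
    ∀ j ∈ W, p < j → W[t] ≤ j := by
  intro j hj hpj
  obtain ⟨s, hsl, rfl⟩ := List.getElem_of_mem hj
  rcases lt_trichotomy s t with h | h | h
  · have := hmax s hsl h
    rw [getElem!_pos _ s hsl] at this
    omega
  · subst h; exact le_rfl
  · exact le_of_lt (List.pairwise_iff_getElem.mp hs t s ht hsl h)

-- on overflow A's inner scan stops exactly at the equal-pair position B reads off by index
theorem overflow_scan (a : List Int) (k n i dec base : Int) (hk0 : 0 ≤ k)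
    (hn : n ≤ (a.length:Int)) (_h1i : 1 ≤ i) (hin : i < n) (hd0 : 0 ≤ dec) (_hdi : dec < i)
    (hbase : base = ((eqList a (dec+1)).length : Int))
    (hover : base + k < ((eqList a (i+1)).length : Int))
    (p : Int) (hpd : dec ≤ p) (_hpi : p ≤ i)
    (hpmax : ∀ s : Nat, s < (eqList a (i+1)).length →
        (s:Int) < ((eqList a (i+1)).length : Int) - k - 1 → (eqList a (i+1))[s]! ≤ p)
    (hplt : p < PySem.List.pyGetD (eqList a (i+1)) (((eqList a (i+1)).length:Int) - k - 1) 0) :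
    solveAWhile a k (k+1) p (a.length+1)
      = (k, PySem.List.pyGetD (eqList a (i+1)) (((eqList a (i+1)).length:Int) - k - 1) 0) := by
  have hblen : 0 ≤ base := by rw [hbase]; positivity
  have htlo : 0 ≤ ((eqList a (i+1)).length:Int) - k - 1 := by omega
  have hthi : ((eqList a (i+1)).length:Int) - k - 1 < ((eqList a (i+1)).length:Int) := by omega
  set W := eqList a (i+1) with hW
  set t : Nat := (((W.length:Int)) - k - 1).toNat with ht
  have htl : t < W.length := by omega
  have hj0 : PySem.List.pyGetD W (((W.length:Int)) - k - 1) 0 = W[t] := by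
    rw [PySem.List.pyGetD_eq_getElem W 0 htlo hthi]
  rw [hj0] at hplt ⊢
  have hj0mem : W[t] ∈ W := List.getElem_mem htl
  have hj0chr := (mem_eqList a (i+1) _).mp hj0mem
  apply solveAWhile_spec a k (a.length+1) p W[t] hplt hj0chr.2.2
  · intro j hj1 hj2 heqj
    have hjmem : j ∈ W := by
      rw [hW, mem_eqList]
      exact ⟨by omega, by omega, heqj⟩
    have := sorted_next W (eqList_sorted a (i+1)) t htl p
      (fun s hsl hst => hpmax s hsl (by omega)) j hjmem hj1
    omega
  · omega

-- first overflow after a decrease: the scan from dec stops at the oldest equal pair of the window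
theorem overflow_first (a : List Int) (n i dec base k : Int) (hk0 : 0 ≤ k)
    (hn : n ≤ (a.length:Int)) (h1i : 1 ≤ i) (hin : i < n) (hd0 : 0 ≤ dec) (hdi : dec < i)
    (hbase : base = ((eqList a (dec+1)).length : Int))
    (hcnt : ((eqList a (i+1)).length : Int) = base + k + 1) :
    solveAWhile a k (k+1) dec (a.length+1)
      = (k, PySem.List.pyGetD (eqList a (i+1)) (((eqList a (i+1)).length:Int) - k - 1) 0)
    ∧ dec < PySem.List.pyGetD (eqList a (i+1)) (((eqList a (i+1)).length:Int) - k - 1) 0 := by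
  have hblen : 0 ≤ base := by rw [hbase]; positivity
  have hidx0 : 0 ≤ ((eqList a (i+1)).length:Int) - k - 1 := by omega
  have hidxl : ((eqList a (i+1)).length:Int) - k - 1 < ((eqList a (i+1)).length:Int) := by omega
  have hplt : dec < PySem.List.pyGetD (eqList a (i+1)) (((eqList a (i+1)).length:Int) - k - 1) 0 := by
    rw [PySem.List.pyGetD_eq_getElem _ 0 hidx0 hidxl,
      ← getElem!_pos (eqList a (i+1)) ((((eqList a (i+1)).length:Int) - k - 1).toNat) (by omega)]
    exact eqList_getElem_gt_dec a dec (i+1) hd0 (by omega) _ (by omega) (by omega)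
  refine ⟨?_, hplt⟩
  apply overflow_scan a k n i dec base hk0 hn h1i hin hd0 hdi hbase (by omega)
    dec (le_refl dec) (by omega) ?_ hplt
  intro s hsl hst
  exact eqList_getElem_le_dec a dec (i+1) hd0 (by omega) s hsl (by omega)

-- later overflows: the scan from the current window start stops at the next equal pair
theorem overflow_next (a : List Int) (n i dec base k : Int) (hk0 : 0 ≤ k)
    (hn : n ≤ (a.length:Int)) (h1i : 1 ≤ i) (hin : i < n) (hd0 : 0 ≤ dec) (hdi : dec < i)
    (hbase : base = ((eqList a (dec+1)).length : Int))
    (heq : PySem.List.pyGetD a i 0 = PySem.List.pyGetD a (i-1) 0)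
    (hcnt : base + k < ((eqList a i).length : Int)) :
    solveAWhile a k (k+1)
        (PySem.List.pyGetD (eqList a i) (((eqList a i).length:Int) - k - 1) 0) (a.length+1)
      = (k, PySem.List.pyGetD (eqList a (i+1)) (((eqList a (i+1)).length:Int) - k - 1) 0)
    ∧ dec < PySem.List.pyGetD (eqList a (i+1)) (((eqList a (i+1)).length:Int) - k - 1) 0 := by
  have hblen : 0 ≤ base := by rw [hbase]; positivity
  have hE : eqList a (i+1) = eqList a i ++ [i] := by
    rw [eqList_succ a i h1i, if_pos heq]
  have hlenE : (eqList a (i+1)).length = (eqList a i).length + 1 := by rw [hE]; simp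
  have hidx0 : 0 ≤ ((eqList a (i+1)).length:Int) - k - 1 := by omega
  have hidxl : ((eqList a (i+1)).length:Int) - k - 1 < ((eqList a (i+1)).length:Int) := by omega
  have hpidx0 : 0 ≤ ((eqList a i).length:Int) - k - 1 := by omega
  have hpidxl : ((eqList a i).length:Int) - k - 1 < ((eqList a i).length:Int) := by omega
  -- the current start as an element of eqList a (i+1)
  have hpW : PySem.List.pyGetD (eqList a i) (((eqList a i).length:Int) - k - 1) 0
      = (eqList a (i+1))[(((eqList a i).length:Int) - k - 1).toNat]! := by
    rw [PySem.List.pyGetD_eq_getElem _ 0 hpidx0 hpidxl,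
      getElem!_pos (eqList a (i+1)) (((((eqList a i).length:Int) - k - 1)).toNat) (by omega)]
    rw [List.getElem_of_eq hE, List.getElem_append_left (by omega)]
  have hsort := eqList_sorted a (i+1)
  have hpair := List.pairwise_iff_getElem.mp hsort
  have hplt : PySem.List.pyGetD (eqList a i) (((eqList a i).length:Int) - k - 1) 0
      < PySem.List.pyGetD (eqList a (i+1)) (((eqList a (i+1)).length:Int) - k - 1) 0 := by
    rw [hpW, PySem.List.pyGetD_eq_getElem _ 0 hidx0 hidxl,
      getElem!_pos (eqList a (i+1)) (((((eqList a i).length:Int) - k - 1)).toNat) (by omega)]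
    exact hpair _ _ (by omega) (by omega) (by omega)
  have hpd : dec ≤ PySem.List.pyGetD (eqList a i) (((eqList a i).length:Int) - k - 1) 0 := by
    have := eqList_getElem_gt_dec a dec (i+1) hd0 (by omega)
      ((((eqList a i).length:Int) - k - 1)).toNat (by omega) (by omega)
    rw [hpW]; omega
  have hpi : PySem.List.pyGetD (eqList a i) (((eqList a i).length:Int) - k - 1) 0 ≤ i := by
    have hmem : (eqList a (i+1))[(((eqList a i).length:Int) - k - 1).toNat]! ∈ eqList a (i+1) := by
      rw [getElem!_pos (eqList a (i+1)) (((((eqList a i).length:Int) - k - 1)).toNat) (by omega)]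
      exact List.getElem_mem _
    have := (mem_eqList a (i+1) _).mp hmem
    rw [hpW]; omega
  refine ⟨?_, by omega⟩
  apply overflow_scan a k n i dec base hk0 hn h1i hin hd0 hdi hbase (by omega)
    _ hpd hpi ?_ hplt
  intro s hsl hst
  rw [hpW]
  rcases Nat.lt_or_ge s ((((eqList a i).length:Int) - k - 1)).toNat with hlt | hge
  · have := hpair s _ hsl (by omega) hlt
    rw [getElem!_pos (eqList a (i+1)) s hsl,
      getElem!_pos (eqList a (i+1)) (((((eqList a i).length:Int) - k - 1)).toNat) (by omega)]
    omega
  · have : s = ((((eqList a i).length:Int) - k - 1)).toNat := by omega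
    rw [this]

theorem loops_agree (a : List Int) (k n : Int) (hn : 1 < n → n ≤ (a.length : Int))
    (hka : 0 ≤ k ∨ ∀ j ∈ PySem.List.pyRange 1 n 1,
        PySem.List.pyGetD a j 0 ≠ PySem.List.pyGetD a (j-1) 0) :
    ∀ (f : Nat) (i dec base ck lei : Int) (ansB : List Int),
    (n - i).toNat = f → 1 ≤ i → i ≤ n →
    ansB.length = i.toNat →
    0 ≤ dec → dec < i →
    base = ((eqList a (dec+1)).length : Int) →
    ((((eqList a i).length : Int) - base = 0 ∨ ((eqList a i).length : Int) - base ≤ k) →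
      ck = ((eqList a i).length : Int) - base ∧ lei = dec ∧
      PySem.List.pyGetD ansB (-1) 0 = dec + 1) →
    (¬(((eqList a i).length : Int) - base = 0 ∨ ((eqList a i).length : Int) - base ≤ k) →
      ck = k ∧ lei = PySem.List.pyGetD (eqList a i) (((eqList a i).length : Int) - k - 1) 0 ∧
      PySem.List.pyGetD ansB (-1) 0 = lei + 1) →
    solveALoop a k n i (ansB ++ List.replicate (n.toNat - i.toNat) (0:Int)) ck lei
      = solveBLoop a k n i ansB (eqList a i) dec base := by
  intro f
  induction f with
  | zero =>
    intro i dec base ck lei ansB hf h1i hin hlen hd0 hdi hbase hlow hhigh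
    have hieq : i = n := by omega
    subst hieq
    rw [solveALoop, solveBLoop]
    simp
  | succ f ih =>
    intro i dec base ck lei ansB hf h1i hin hlen hd0 hdi hbase hlow hhigh
    have hiltn : i < n := by omega
    have hrep : n.toNat - i.toNat = (n.toNat - (i+1).toNat) + 1 := by omega
    have hblen : 0 ≤ base := by rw [hbase]; positivity
    have hbli : base ≤ ((eqList a i).length : Int) := by
      rw [hbase]
      exact_mod_cast eqList_mono_len a (dec+1) i (by omega) (by omega)
    rw [solveALoop, solveBLoop]
    simp only [dif_pos hiltn]
    rcases lt_trichotomy (PySem.List.pyGetD a i 0) (PySem.List.pyGetD a (i-1) 0) with hlt | heq | hgt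
    · -- decrease: window restarts at i
      rw [if_neg (by omega), if_pos hlt, if_pos hlt]
      rw [hrep, set_append_replicate ansB _ _ i hlen (by omega)]
      simp only [Nat.add_sub_cancel]
      have hE : eqList a (i+1) = eqList a i := by
        rw [eqList_succ a i h1i, if_neg (by omega)]; simp
      have := ih (i+1) i ((eqList a i).length : Int) 0 i (ansB ++ [i+1])
        (by omega) (by omega) (by omega) (by simp [hlen]; omega) (by omega) (by omega)
        (by rw [hE])
        (by intro _
            refine ⟨by rw [hE]; omega, rfl, ?_⟩
            rw [PySem.List.pyGetD_neg_one_append_singleton])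
        (by intro hcon; exfalso; apply hcon; left; rw [hE]; omega)
      rw [hE] at this
      have hcast : ((i+1:Int)).toNat = i.toNat + 1 := by omega
      simpa [hcast] using this
    · -- equal: one more equal pair in the window
      have hA1 : ¬ (PySem.List.pyGetD a (i-1) 0 < PySem.List.pyGetD a i 0) := by omega
      have hB1 : ¬ (PySem.List.pyGetD a i 0 < PySem.List.pyGetD a (i-1) 0) := by omega
      rw [if_neg hA1, if_neg hB1, if_neg hB1, if_pos heq]
      have hk0 : 0 ≤ k := by
        rcases hka with h | h
        · exact h
        · exact absurd heq (h i (PySem.List.mem_pyRange_one.mpr ⟨h1i, hiltn⟩))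
      have hE : eqList a (i+1) = eqList a i ++ [i] := by
        rw [eqList_succ a i h1i, if_pos heq]
      have hlenE : (eqList a i ++ [i]).length = (eqList a i).length + 1 := by simp
      have hna2 : n ≤ (a.length : Int) := hn (by omega)
      by_cases hover : k < ((eqList a i).length : Int) + 1 - base
      · -- overflow: A scans forward, B indexes into eqpos
        rw [if_pos (show k < ((eqList a i ++ [i]).length : Int) - base by rw [hlenE]; push_cast; omega)]
        by_cases hc : ((eqList a i).length : Int) - base = 0 ∨ ((eqList a i).length : Int) - base ≤ k
        · -- first overflow since the last decrease: current_k was cnt = k, start was dec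
          obtain ⟨hck, hlei, hlast⟩ := hlow hc
          have hcnt : ((eqList a i).length : Int) - base = k := by
            rcases hc with h | h <;> omega
          have hckk : ck = k := by omega
          rw [if_neg (show ¬ (ck + 1 ≤ k) by omega)]
          obtain ⟨hscan, hgt⟩ := overflow_first a n i dec base k hk0 hna2 h1i hiltn hd0 hdi hbase
            (by rw [hE, hlenE]; push_cast; omega)
          rw [hE] at hscan hgt
          have hs1 : (solveAWhile a k (ck+1) lei (a.length+1)).1 = k := by
            rw [hckk, hlei, hscan]
          have hs2 : (solveAWhile a k (ck+1) lei (a.length+1)).2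
              = PySem.List.pyGetD (eqList a i ++ [i]) (((eqList a i ++ [i]).length:Int) - k - 1) 0 := by
            rw [hckk, hlei, hscan]
          rw [hs1, hs2]
          rw [hrep, set_append_replicate ansB _ _ i hlen (by omega)]
          simp only [Nat.add_sub_cancel]
          have := ih (i+1) dec base k
            (PySem.List.pyGetD (eqList a i ++ [i]) (((eqList a i ++ [i]).length:Int) - k - 1) 0)
            (ansB ++ [PySem.List.pyGetD (eqList a i ++ [i]) (((eqList a i ++ [i]).length:Int) - k - 1) 0 + 1])
            (by omega) (by omega) (by omega) (by simp [hlen]; omega) hd0 (by omega) hbase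
            (by intro hcon; exfalso
                rw [hE, hlenE] at hcon
                push_cast at hcon
                omega)
            (by intro _
                rw [hE]
                exact ⟨rfl, rfl, by rw [PySem.List.pyGetD_neg_one_append_singleton]⟩)
          rw [hE] at this
          have hcast : ((i+1:Int)).toNat = i.toNat + 1 := by omega
          simpa [hcast] using this
        · -- repeated overflow: current_k was k, start was the (k+1)-last equal pair
          obtain ⟨hck, hlei, hlast⟩ := hhigh hc
          have hcnt : k < ((eqList a i).length : Int) - base := by omega
          rw [if_neg (show ¬ (ck + 1 ≤ k) by omega)]
          obtain ⟨hscan, hgt⟩ := overflow_next a n i dec base k hk0 hna2 h1i hiltn hd0 hdi hbase heq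
            (by omega)
          rw [hE] at hscan hgt
          have hs1 : (solveAWhile a k (ck+1) lei (a.length+1)).1 = k := by
            rw [hck, hlei, hscan]
          have hs2 : (solveAWhile a k (ck+1) lei (a.length+1)).2
              = PySem.List.pyGetD (eqList a i ++ [i]) (((eqList a i ++ [i]).length:Int) - k - 1) 0 := by
            rw [hck, hlei, hscan]
          rw [hs1, hs2]
          rw [hrep, set_append_replicate ansB _ _ i hlen (by omega)]
          simp only [Nat.add_sub_cancel]
          have := ih (i+1) dec base k
            (PySem.List.pyGetD (eqList a i ++ [i]) (((eqList a i ++ [i]).length:Int) - k - 1) 0)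
            (ansB ++ [PySem.List.pyGetD (eqList a i ++ [i]) (((eqList a i ++ [i]).length:Int) - k - 1) 0 + 1])
            (by omega) (by omega) (by omega) (by simp [hlen]; omega) hd0 (by omega) hbase
            (by intro hcon; exfalso
                rw [hE, hlenE] at hcon
                push_cast at hcon
                omega)
            (by intro _
                rw [hE]
                exact ⟨rfl, rfl, by rw [PySem.List.pyGetD_neg_one_append_singleton]⟩)
          rw [hE] at this
          have hcast : ((i+1:Int)).toNat = i.toNat + 1 := by omega
          simpa [hcast] using this
      · -- still within budget
        rw [if_neg (show ¬ k < ((eqList a i ++ [i]).length : Int) - base by rw [hlenE]; push_cast; omega)]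
        have hcl := hlow (Or.inr (by omega))
        obtain ⟨hck, hlei, hlast⟩ := hcl
        rw [if_pos (show ck + 1 ≤ k by omega)]
        rw [read_last ansB _ i h1i hlen]
        rw [hrep, set_append_replicate ansB _ _ i hlen (by omega)]
        simp only [Nat.add_sub_cancel]
        have := ih (i+1) dec base (ck+1) lei (ansB ++ [PySem.List.pyGetD ansB (-1) 0])
          (by omega) (by omega) (by omega) (by simp [hlen]; omega) hd0 (by omega) hbase
          (by intro _
              refine ⟨?_, hlei, ?_⟩
              · rw [hE]; simp; omega
              · rw [PySem.List.pyGetD_neg_one_append_singleton, hlast])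
          (by intro hcon; exfalso; apply hcon; right; rw [hE]; simp; omega)
        rw [hE] at this
        have hcast : ((i+1:Int)).toNat = i.toNat + 1 := by omega
        simpa [hcast] using this
    · -- increase: everything carries over
      rw [if_pos hgt, if_neg (by omega), if_neg (by omega)]
      rw [read_last ansB _ i h1i hlen]
      rw [hrep, set_append_replicate ansB _ _ i hlen (by omega)]
      simp only [Nat.add_sub_cancel]
      have hE : eqList a (i+1) = eqList a i := by
        rw [eqList_succ a i h1i, if_neg (by omega)]; simp
      have := ih (i+1) dec base ck lei (ansB ++ [PySem.List.pyGetD ansB (-1) 0])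
        (by omega) (by omega) (by omega) (by simp [hlen]; omega) hd0 (by omega) hbase
        (by intro hc
            rw [hE] at hc
            obtain ⟨h1, h2, h3⟩ := hlow hc
            exact ⟨by rw [hE]; exact h1, h2,
              by rw [PySem.List.pyGetD_neg_one_append_singleton, h3]⟩)
        (by intro hc
            rw [hE] at hc
            obtain ⟨h1, h2, h3⟩ := hhigh hc
            exact ⟨h1, by rw [hE]; exact h2,
              by rw [PySem.List.pyGetD_neg_one_append_singleton, h3]⟩)
      rw [hE] at this
      have hcast : ((i+1:Int)).toNat = i.toNat + 1 := by omega
      simpa [hcast] using this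

theorem res_agree (ans x : List Int) (m : Int) :
    ∀ (f : Nat) (i : Int) (pref : List Int),
    (m - i).toNat = f → 0 ≤ i → pref.length = i.toNat →
    solveARes ans x m i (pref ++ List.replicate (m.toNat - i.toNat) (0:Int))
      = pref ++ (PySem.List.pyRange i m 1).map
          (fun j => PySem.List.pyGetD ans (PySem.List.pyGetD x j 0 - 1) 0) := by
  intro f
  induction f with
  | zero =>
    intro i pref hf h0 hlen
    rw [solveARes]
    rw [dif_neg (by omega : ¬ i < m)]
    have h1 : m.toNat - i.toNat = 0 := by omega
    rw [h1, PySem.List.pyRange_one_eq_nil (by omega : m ≤ i)]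
    simp
  | succ f ih =>
    intro i pref hf h0 hlen
    have him : i < m := by omega
    rw [solveARes]
    simp only [dif_pos him]
    have hrep : m.toNat - i.toNat = (m.toNat - (i+1).toNat) + 1 := by omega
    rw [hrep, set_append_replicate pref _ _ i hlen (by omega)]
    simp only [Nat.add_sub_cancel]
    rw [ih (i+1) (pref ++ [PySem.List.pyGetD ans (PySem.List.pyGetD x i 0 - 1) 0])
      (by omega) (by omega) (by simp [hlen]; omega)]
    rw [PySem.List.pyRange_one_cons him]
    simp

-- ===== VERDICT (by name: the statement is the Claim_ definition above) =====
theorem solve_spec : Claim_equal_solve := by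
  intro n a m k x hDom hPre
  obtain ⟨hn1, hna, hmx, _hq, hka⟩ := hPre
  unfold Spec_solve solve solve_alt
  have hone : (List.replicate n.toNat (0:Int)).set 0 1 = [1] ++ List.replicate (n.toNat - 1) 0 := by
    obtain ⟨r, hr⟩ : ∃ r, n.toNat = r + 1 := ⟨n.toNat - 1, by omega⟩
    rw [hr, List.replicate_succ]
    simp
  rw [hone]
  have hloop := loops_agree a k n hna hka (n-1).toNat 1 0 0 0 0 [1]
    (by omega) (by omega) (by omega) (by simp) (by omega) (by omega)
    (by norm_num [eqList_one])
    (by intro _; rw [eqList_one]; exact ⟨by simp, rfl, by decide⟩)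
    (by intro hcon; exfalso; apply hcon; left; rw [eqList_one]; simp)
  simp only [Int.toNat_one] at hloop
  rw [hloop, eqList_one a]
  have hres := res_agree (solveBLoop a k n 1 [1] [] 0 0) x m m.toNat 0 []
    (by omega) (by omega) (by simp)
  simp only [List.nil_append, Int.toNat_zero, Nat.sub_zero] at hres
  rw [hres]
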